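-- pv_equiv track=rewrite | github.com/pm1100tm/Algorithm | programmers/level_1/lv_1_017_콜라문제.py | solution
-- ===== SOURCE A (Python) =====
-- def solution(a: int, b: int, n: int):
--     total_bottle_got_for_free = 0
--
--     if n < a:
--         return total_bottle_got_for_free
--
--     empty_bottle = n
--
--     while empty_bottle >= a:
--         quotient, remains = divmod(empty_bottle, a)
--         total_bottle_got_for_free += (quotient * b)
--         empty_bottle = (quotient * b) + remains
--
--     return total_bottle_got_for_free
-- ===== SOURCE B (Python) =====
-- def solution(a: int, b: int, n: int):
--     if n < a:
--         return 0
--     return (n - b) // (a - b) * b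
-- ===== Notes on version B (the rewrite author's own statement) =====
-- stated objective: simpler
-- what changed: Replaces A's repeated divmod exchange-simulation loop with the closed-form count of exchanges ((n-b)//(a-b))*b.
-- outside the precondition, e.g. on solution(2, -5, 6): A returns -15, B returns -5
import Mathlib
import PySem

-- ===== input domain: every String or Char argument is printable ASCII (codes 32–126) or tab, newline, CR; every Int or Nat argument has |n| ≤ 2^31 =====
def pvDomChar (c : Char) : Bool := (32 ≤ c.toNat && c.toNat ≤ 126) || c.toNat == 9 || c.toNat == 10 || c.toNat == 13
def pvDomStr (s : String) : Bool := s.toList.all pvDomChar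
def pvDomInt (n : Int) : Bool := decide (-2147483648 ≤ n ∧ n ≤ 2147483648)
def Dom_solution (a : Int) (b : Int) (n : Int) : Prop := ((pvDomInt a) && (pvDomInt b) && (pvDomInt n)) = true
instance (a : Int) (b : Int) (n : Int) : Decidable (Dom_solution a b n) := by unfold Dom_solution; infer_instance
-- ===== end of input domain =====

-- B replaces A's exchange-simulation loop with the closed-form ((n-b)//(a-b))*b (simpler: no loop).
-- ===== PORT A =====
-- A's while loop, transliterated with a fuel bound (fuel n+1 strictly exceeds the iteration
-- count whenever the loop terminates; it only makes the recursion total, the computation is A's).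
def solutionLoop (a : Int) (b : Int) (fuel : Nat) (total : Int) (empty : Int) : Int :=
  match fuel with
  | 0 => total
  | fuel + 1 =>
    if a ≤ empty then
      match PySem.Int.divmod? empty a with
      | none => total                     -- divmod by 0: A raises here (outside Pre_)
      | some (q, r) => solutionLoop a b fuel (total + q * b) (q * b + r)
    else total

def solution (a : Int) (b : Int) (n : Int) : Int :=
  if n < a then 0
  else solutionLoop a b (n.toNat + 1) 0 n

-- ===== PORT B =====
def solution_alt (a : Int) (b : Int) (n : Int) : Int :=
  if n < a then 0
  else PySem.Int.floordiv (n - b) (a - b) * b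

-- ===== PRECONDITION & SPEC =====
-- Pre_ restricts the loop case to the problem's natural domain 1 ≤ a, 0 ≤ b < a: outside it A
-- raises ZeroDivisionError (a = 0), diverges (e.g. b ≥ a, or a < 0), or returns artifacts of
-- simulating the exchange with a negative/ill-formed bottle count; the n < a case is kept for all a, b.
def Pre_solution (a : Int) (b : Int) (n : Int) : Prop :=
  n < a ∨ (1 ≤ a ∧ 0 ≤ b ∧ b < a)
instance (a : Int) (b : Int) (n : Int) : Decidable (Pre_solution a b n) := by unfold Pre_solution; infer_instance
def pvWitness_solution : Int × Int × Int := (3, 1, 20)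
def Spec_solution (a : Int) (b : Int) (n : Int) (out : Int) : Prop := out = solution_alt a b n
instance (a : Int) (b : Int) (n : Int) (out : Int) : Decidable (Spec_solution a b n out) := by unfold Spec_solution; infer_instance

-- ===== CLAIM (what is proved, stated in full; the proofs are below) =====
def Claim_equal_solution : Prop := ∀ (a : Int) (b : Int) (n : Int), Dom_solution a b n → Pre_solution a b n → Spec_solution a b n (solution a b n)

-- ===== LEMMAS AND PROOFS =====

-- ===== VERDICT (by name: the statement is the Claim_ definition above) =====
-- d := a - b is positive; e - b = q*d + (q*b + r - b) with e = q*a + r gives the step identity.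
theorem loop_closed (a b : Int) (ha : 1 ≤ a) (hb : 0 ≤ b) (hba : b < a) :
    ∀ (fuel : Nat) (e total : Int), 0 ≤ e → e < (fuel : Int) → (a ≤ e ∨ b ≤ e ∨ b = 0) →
      solutionLoop a b fuel total e = total + (e - b) / (a - b) * b := by
  intro fuel
  induction fuel with
  | zero => intro e total h0 hf _; exact absurd hf (by push_cast; omega)
  | succ fuel ih =>
    intro e total h0 hf hc
    rw [solutionLoop]
    by_cases hae : a ≤ e
    · simp only [hae, if_true]
      have hane : a ≠ 0 := by omega
      simp only [PySem.Int.divmod?, hane, if_false]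
      have hfd : e.fdiv a = e / a := by
        rw [Int.fdiv_eq_ediv]; simp [show (0:Int) ≤ a by omega]
      have hfm : e.fmod a = e % a := by
        rw [Int.fmod_eq_emod]; simp [show (0:Int) ≤ a by omega]
      rw [hfd, hfm]
      set q := e / a with hq
      set r := e % a with hr
      have hr0 : 0 ≤ r := Int.emod_nonneg e hane
      have hra : r < a := Int.emod_lt_of_pos e (by omega)
      have heq : e = q * a + r := by rw [hq, hr, mul_comm]; exact (Int.mul_ediv_add_emod e a).symm
      have hq1 : 1 ≤ q := by
        rw [hq, Int.le_ediv_iff_mul_le (by omega : (0:Int) < a)]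
        omega
      have hqb : 0 ≤ q * b := mul_nonneg (by omega) hb
      have hstep : e - b = (q * b + r - b) + (a - b) * q := by ring_nf; omega
      have hdec : q * b + r < e := by
        have : q * b < q * a := by
          exact mul_lt_mul_of_pos_left hba (by omega)
        omega
      rw [ih (q * b + r) (total + q * b) (by omega) (by omega)
          (by rcases eq_or_lt_of_le hb with h | h
              · exact Or.inr (Or.inr h.symm)
              · exact Or.inr (Or.inl (by nlinarith)))]
      rw [hstep, Int.add_mul_ediv_left _ _ (by omega : a - b ≠ 0)]
      ring
    · simp only [hae, if_false]
      have hz : (e - b) / (a - b) * b = 0 := by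
        rcases hc with h | h | h
        · omega
        · rw [Int.ediv_eq_zero_of_lt (by omega) (by omega)]; ring
        · simp [h]
      omega

theorem solution_spec : Claim_equal_solution := by
  intro a b n _ hpre
  unfold Spec_solution solution solution_alt
  by_cases h : n < a
  · simp [h]
  · simp only [h, if_false]
    rcases hpre with h' | ⟨ha, hb, hba⟩
    · omega
    · rw [loop_closed a b ha hb hba (n.toNat + 1) n 0 (by omega) (by omega) (Or.inl (by omega))]
      rw [PySem.Int.floordiv_eq_ediv_of_pos (by omega)]
      ring
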